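-- pv_equiv track=rewrite | github.com/AngelVasquezNep/backend-journal | book__algorithms_an_illustrative_guide/divde_land.py | gratest_square
-- ===== SOURCE A (Python) =====
-- def gratest_square(width, height):
--     largest_size = width
--     smallest_size = height
--     if height > width:
--         largest_size = height
--         smallest_size = width
--
--     remaining = largest_size % smallest_size
--     if remaining == 0:
--         return smallest_size
--
--     return gratest_square(width=largest_size, height=remaining)
-- ===== SOURCE B (Python) =====
-- def gratest_square(width, height):
--     if height > width:
--         largest, smallest = height, width
--     else:
--         largest, smallest = width, height
--     while largest % smallest != 0:
--         smallest = largest % smallest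
--     return smallest
-- ===== Notes on version B (the rewrite author's own statement) =====
-- stated objective: idiomatic
-- what changed: Replaces A's tail recursion (which re-derives largest/smallest by comparison on every call) with a single up-front swap followed by an explicit while-loop that keeps the larger operand fixed and only updates the smaller one.
import Mathlib
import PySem

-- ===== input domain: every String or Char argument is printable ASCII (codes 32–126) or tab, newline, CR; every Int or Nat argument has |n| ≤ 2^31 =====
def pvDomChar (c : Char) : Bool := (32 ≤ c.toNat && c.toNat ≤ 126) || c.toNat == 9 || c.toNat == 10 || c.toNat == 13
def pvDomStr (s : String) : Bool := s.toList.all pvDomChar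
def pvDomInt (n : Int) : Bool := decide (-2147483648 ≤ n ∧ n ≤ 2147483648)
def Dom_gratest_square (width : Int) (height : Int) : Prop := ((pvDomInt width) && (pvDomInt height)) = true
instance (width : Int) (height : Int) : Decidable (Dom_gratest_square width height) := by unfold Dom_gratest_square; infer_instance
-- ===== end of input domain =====

-- B replaces A's tail recursion (which re-derives largest/smallest each call) with one
-- up-front swap and an explicit while-loop updating only the smaller operand; same cost.

-- Python '%' has |mod a b| < |b| for b ≠ 0; used by both ports' termination.
theorem pyMod_natAbs_lt (a b : Int) (hb : b ≠ 0) :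
    (PySem.Int.mod a b).natAbs < b.natAbs := by
  rcases lt_or_gt_of_ne hb with h | h
  · have := PySem.Int.mod_neg_bounds a h
    omega
  · have h1 := PySem.Int.mod_nonneg a h
    have h2 := PySem.Int.mod_lt a h
    omega

-- When s ≤ l and mod l s ≠ 0, the remainder stays ≤ l (so A's swap is a no-op in
-- recursive calls); used by A's port termination and the equivalence proof.
theorem pyMod_le_of_le (l s : Int) (hs0 : s ≠ 0) (hsl : s ≤ l)
    (hr : PySem.Int.mod l s ≠ 0) : PySem.Int.mod l s ≤ l := by
  rcases lt_or_gt_of_ne hs0 with hs | hs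
  · have hb := PySem.Int.mod_neg_bounds l hs
    by_cases hl : 0 ≤ l
    · omega
    · have hne : s ≠ l := by
        rintro rfl
        exact hr ((PySem.Int.mod_eq_zero_iff_dvd _ _).mpr dvd_rfl)
      have heq := PySem.Int.floordiv_mul_add_mod l s
      set f := PySem.Int.floordiv l s with hf
      rcases lt_trichotomy f 0 with hfneg | hf0 | hfpos
      · have hp : 0 ≤ (-(f + 1)) * (-s) := mul_nonneg (by omega) (by omega)
        have hp' : 0 ≤ f * s + s := by nlinarith [hp]
        linarith
      · have hml : PySem.Int.mod l s = l := by
          rw [hf0] at heq; simpa using heq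
        omega
      · have hsl' : s < l := lt_of_le_of_ne hsl hne
        have hp : (f - 1) * s ≤ 0 := mul_nonpos_iff.mpr (Or.inl ⟨by omega, by omega⟩)
        have hp' : f * s ≤ s := by nlinarith [hp]
        linarith
  · have h1 := PySem.Int.mod_nonneg l hs
    have h2 := PySem.Int.mod_lt l hs
    omega

-- ===== PORT A =====
def gratest_square (width : Int) (height : Int) : Int :=
  let largest_size := if height > width then height else width
  let smallest_size := if height > width then width else height
  if _h0 : smallest_size = 0 then 0  -- Python raises ZeroDivisionError here; excluded by Pre_
  else
    let remaining := PySem.Int.mod largest_size smallest_size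
    if _h1 : remaining = 0 then smallest_size
    else gratest_square largest_size remaining
termination_by (if height > width then width else height).natAbs
decreasing_by
  have habs := pyMod_natAbs_lt (if height > width then height else width)
      (if height > width then width else height) _h0
  have hle := pyMod_le_of_le (if height > width then height else width)
      (if height > width then width else height) _h0 (by split <;> omega) _h1
  by_cases hc : height > width
  · simp only [hc] at habs hle ⊢
    simp only [if_true, dite_true] at habs hle ⊢
    rw [if_neg (not_lt.mpr hle)]
    omega
  · simp only [hc] at habs hle ⊢
    simp only [if_false, dite_false] at habs hle ⊢
    rw [if_neg (not_lt.mpr hle)]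
    omega

-- ===== PORT B =====
-- while largest % smallest != 0: smallest = largest % smallest
def gsWhile (largest : Int) (smallest : Int) : Int :=
  if _h0 : smallest = 0 then smallest  -- Python raises ZeroDivisionError here; excluded by Pre_
  else if PySem.Int.mod largest smallest = 0 then smallest
  else gsWhile largest (PySem.Int.mod largest smallest)
termination_by smallest.natAbs
decreasing_by exact pyMod_natAbs_lt largest smallest _h0

def gratest_square_alt (width : Int) (height : Int) : Int :=
  let largest := if height > width then height else width
  let smallest := if height > width then width else height
  gsWhile largest smallest

-- ===== PRECONDITION & SPEC =====
-- Pre_ excludes exactly the inputs where Python A (and B) raise ZeroDivisionError: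
-- when the smaller of the two arguments is 0.
def Pre_gratest_square (width : Int) (height : Int) : Prop :=
  min width height ≠ 0
instance (width : Int) (height : Int) : Decidable (Pre_gratest_square width height) := by
  unfold Pre_gratest_square; infer_instance

def pvWitness_gratest_square : Int × Int := (12, 5)

def Spec_gratest_square (width : Int) (height : Int) (out : Int) : Prop := out = gratest_square_alt width height
instance (width : Int) (height : Int) (out : Int) : Decidable (Spec_gratest_square width height out) := by unfold Spec_gratest_square; infer_instance

-- ===== CLAIM (what is proved, stated in full; the proofs are below) =====
def Claim_equal_gratest_square : Prop := ∀ (width : Int) (height : Int), Dom_gratest_square width height → Pre_gratest_square width height → Spec_gratest_square width height (gratest_square width height)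

-- ===== LEMMAS AND PROOFS =====

theorem gratest_eq_gsWhile (width height : Int) :
    gratest_square width height =
      gsWhile (if height > width then height else width)
              (if height > width then width else height) := by
  rw [gratest_square, gsWhile]
  simp only []
  by_cases h0 : (if height > width then width else height) = 0
  · simp [h0]
  · simp only [dif_neg h0]
    by_cases h1 : PySem.Int.mod (if height > width then height else width)
        (if height > width then width else height) = 0
    · simp [h1]
    · simp only [if_neg h1, dif_neg h1]
      have hle := pyMod_le_of_le (if height > width then height else width)
          (if height > width then width else height) h0 (by split <;> omega) h1
      have hrec := gratest_eq_gsWhile (if height > width then height else width)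
          (PySem.Int.mod (if height > width then height else width)
            (if height > width then width else height))
      rw [hrec]
      rw [if_neg (not_lt.mpr hle), if_neg (not_lt.mpr hle)]
termination_by (if height > width then width else height).natAbs
decreasing_by
  have habs := pyMod_natAbs_lt (if height > width then height else width)
      (if height > width then width else height) h0
  have hle := pyMod_le_of_le (if height > width then height else width)
      (if height > width then width else height) h0 (by split <;> omega) h1
  by_cases hc : height > width
  · simp only [hc] at habs hle ⊢
    simp only [if_true] at habs hle ⊢
    rw [if_neg (not_lt.mpr hle)]
    omega
  · simp only [hc] at habs hle ⊢
    simp only [if_false] at habs hle ⊢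
    rw [if_neg (not_lt.mpr hle)]
    omega

-- ===== VERDICT (by name: the statement is the Claim_ definition above) =====
theorem gratest_square_spec : Claim_equal_gratest_square := by
  intro width height _ _
  unfold Spec_gratest_square gratest_square_alt
  exact gratest_eq_gsWhile width height
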